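-- pv_equiv track=rewrite | github.com/danillomiqui-commits/Project2 | Staicase_Pareto-Optimal_Q4.py | find_pareto_optimal
-- ===== SOURCE A (Python) =====
-- def find_pareto_optimal(points):
--     pareto_points = []
--     max_y = float("-inf")
--
--     for point in points:
--         x, y = point
--         if y >= max_y:
--             pareto_points.append(point)
--             max_y = y
--     return pareto_points
-- ===== SOURCE B (Python) =====
-- def find_pareto_optimal(points):
--     # pass 1: exclusive prefix maximum of y-values
--     prefix_maxes = []
--     m = float("-inf")
--     for point in points:
--         x, y = point
--         prefix_maxes.append(m)
--         m = y if y > m else m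
--     # pass 2: keep each point whose y reaches its exclusive prefix max
--     return [p for p, pm in zip(points, prefix_maxes) if p[1] >= pm]
-- ===== Notes on version B (the rewrite author's own statement) =====
-- stated objective: alternative
-- what changed: Replaces the single filtering loop with running state by two separate passes: one that tabulates the exclusive prefix maximum of the y-values, and a zip-comprehension that keeps each point whose y reaches its prefix max.
import Mathlib
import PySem

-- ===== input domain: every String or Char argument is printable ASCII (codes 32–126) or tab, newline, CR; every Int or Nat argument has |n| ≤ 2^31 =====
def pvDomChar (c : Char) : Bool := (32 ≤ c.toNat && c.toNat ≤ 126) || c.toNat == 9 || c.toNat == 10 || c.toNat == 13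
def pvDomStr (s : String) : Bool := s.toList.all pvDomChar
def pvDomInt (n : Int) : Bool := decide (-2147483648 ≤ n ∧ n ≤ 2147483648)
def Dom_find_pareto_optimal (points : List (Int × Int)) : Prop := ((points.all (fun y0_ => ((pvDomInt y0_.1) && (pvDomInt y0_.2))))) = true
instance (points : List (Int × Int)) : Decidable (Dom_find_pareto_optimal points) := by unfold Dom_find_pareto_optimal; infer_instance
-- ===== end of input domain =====

-- B tabulates the exclusive prefix maxima of the y-values in one pass and then filters
-- points against that table in a second pass (alternative decomposition; same cost).

-- `y >= m` where `m : Option Int` models `float("-inf")` (none) or a running max (some v)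
def pvGeInf (y : Int) (m : Option Int) : Bool :=
  match m with
  | none => true
  | some v => decide (v ≤ y)

-- ===== PORT A =====
def find_pareto_optimal (points : List (Int × Int)) : List (Int × Int) :=
  (points.foldl
    (fun (st : List (Int × Int) × Option Int) (point : Int × Int) =>
      if pvGeInf point.2 st.2 then (st.1 ++ [point], some point.2) else st)
    ([], none)).1

-- ===== PORT B =====
-- `y if y > m else m` with m possibly -inf
def pvPmStep (m : Option Int) (y : Int) : Option Int :=
  match m with
  | none => some y
  | some v => if v < y then some y else some v

-- pass 1 of Source B: the exclusive prefix maxima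
def pvPrefixMaxes (points : List (Int × Int)) : List (Option Int) :=
  (points.foldl
    (fun (st : List (Option Int) × Option Int) (point : Int × Int) =>
      (st.1 ++ [st.2], pvPmStep st.2 point.2))
    ([], none)).1

def find_pareto_optimal_alt (points : List (Int × Int)) : List (Int × Int) :=
  ((points.zip (pvPrefixMaxes points)).filter (fun q => pvGeInf q.1.2 q.2)).map Prod.fst

-- ===== PRECONDITION & SPEC =====
def Spec_find_pareto_optimal (points : List (Int × Int)) (out : List (Int × Int)) : Prop := out = find_pareto_optimal_alt points
instance (points : List (Int × Int)) (out : List (Int × Int)) : Decidable (Spec_find_pareto_optimal points out) := by unfold Spec_find_pareto_optimal; infer_instance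

-- ===== CLAIM (what is proved, stated in full; the proofs are below) =====
def Claim_equal_find_pareto_optimal : Prop := ∀ (points : List (Int × Int)), Dom_find_pareto_optimal points → Spec_find_pareto_optimal points (find_pareto_optimal points)

-- ===== LEMMAS AND PROOFS =====

-- reference recursion both ports reduce to
def pvGo (m : Option Int) : List (Int × Int) → List (Int × Int)
  | [] => []
  | p :: ps =>
    if pvGeInf p.2 m then p :: pvGo (pvPmStep m p.2) ps else pvGo (pvPmStep m p.2) ps

-- reference form of the prefix-max table
def pvPM (m : Option Int) : List (Int × Int) → List (Option Int)
  | [] => []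
  | p :: ps => m :: pvPM (pvPmStep m p.2) ps

theorem pvPmStep_of_ge (m : Option Int) (y : Int) (h : pvGeInf y m = true) :
    pvPmStep m y = some y := by
  cases m with
  | none => rfl
  | some v =>
    simp [pvGeInf] at h
    simp [pvPmStep]
    omega

theorem pvPmStep_of_lt (m : Option Int) (y : Int) (h : pvGeInf y m = false) :
    pvPmStep m y = m := by
  cases m with
  | none => simp [pvGeInf] at h
  | some v =>
    simp [pvGeInf] at h
    simp [pvPmStep]
    omega

theorem foldA_eq (ps : List (Int × Int)) :
    ∀ (acc : List (Int × Int)) (m : Option Int),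
      (ps.foldl
        (fun (st : List (Int × Int) × Option Int) (point : Int × Int) =>
          if pvGeInf point.2 st.2 then (st.1 ++ [point], some point.2) else st)
        (acc, m)).1 = acc ++ pvGo m ps := by
  induction ps with
  | nil => intro acc m; simp [pvGo]
  | cons p ps ih =>
    intro acc m
    by_cases h : pvGeInf p.2 m = true
    · simp [List.foldl, h, pvGo, ih, pvPmStep_of_ge m p.2 h]
    · simp at h
      simp [List.foldl, h, pvGo, ih, pvPmStep_of_lt m p.2 h]

theorem foldPM_eq (ps : List (Int × Int)) :
    ∀ (acc : List (Option Int)) (m : Option Int),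
      (ps.foldl
        (fun (st : List (Option Int) × Option Int) (point : Int × Int) =>
          (st.1 ++ [st.2], pvPmStep st.2 point.2))
        (acc, m)).1 = acc ++ pvPM m ps := by
  induction ps with
  | nil => intro acc m; simp [pvPM]
  | cons p ps ih => intro acc m; simp [List.foldl, pvPM, ih]

theorem zip_filter_eq (ps : List (Int × Int)) :
    ∀ (m : Option Int),
      ((ps.zip (pvPM m ps)).filter (fun q => pvGeInf q.1.2 q.2)).map Prod.fst
        = pvGo m ps := by
  induction ps with
  | nil => intro m; simp [pvPM, pvGo]
  | cons p ps ih =>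
    intro m
    by_cases h : pvGeInf p.2 m = true
    · simp [pvPM, pvGo, List.filter, h, ih]
    · simp at h
      simp [pvPM, pvGo, List.filter, h, ih]

-- ===== VERDICT (by name: the statement is the Claim_ definition above) =====
theorem find_pareto_optimal_spec : Claim_equal_find_pareto_optimal := by
  intro points _
  unfold Spec_find_pareto_optimal find_pareto_optimal find_pareto_optimal_alt pvPrefixMaxes
  rw [foldA_eq, foldPM_eq]
  simp only [List.nil_append]
  rw [zip_filter_eq]
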